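-- pv_equiv track=rewrite | github.com/VaHiX/CodeForces | Python/ByTier/A/0930_A_Peculiar_apple_tree.py | process
-- ===== SOURCE A (Python) =====
-- def process(n, A):
--     depth = [0 for i in range(n+1)]
--     depth[1] = 0
--     for i in range(2, n+1):
--         pi = A[i-2]
--         depth[i] = depth[pi]+1
--     d = {}
--     for i in range(1, n+1):
--         x = depth[i]
--         if x not in d:
--             d[x] = 0
--         d[x] = (d[x]+1) % 2
--     return sum(d.values())
-- ===== SOURCE B (Python) =====
-- def process(n, A):
--     def depth(v):
--         d = 0
--         while v != 1:
--             v = A[v - 2]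
--             d += 1
--         return d
--
--     ds = [depth(v) for v in range(1, n + 1)]
--     height = max(ds)
--     return sum(1 for lvl in range(height + 1) if ds.count(lvl) % 2 == 1)
-- ===== Notes on version B (the rewrite author's own statement) =====
-- stated objective: alternative
-- what changed: A fills a depth array bottom-up by one DP pass over parent indices and folds a mod-2 dict over it; B computes each node's depth independently by walking its parent chain up to the root (no shared depth array) and then counts the odd-sized levels by scanning the level numbers 0..max(depths) with list.count.
-- outside the precondition, e.g. on process(2, [2]): A returns 2, B does not finish within the time limit; on process(2, [-2]): A returns 2, B raises IndexError
import Mathlib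
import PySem

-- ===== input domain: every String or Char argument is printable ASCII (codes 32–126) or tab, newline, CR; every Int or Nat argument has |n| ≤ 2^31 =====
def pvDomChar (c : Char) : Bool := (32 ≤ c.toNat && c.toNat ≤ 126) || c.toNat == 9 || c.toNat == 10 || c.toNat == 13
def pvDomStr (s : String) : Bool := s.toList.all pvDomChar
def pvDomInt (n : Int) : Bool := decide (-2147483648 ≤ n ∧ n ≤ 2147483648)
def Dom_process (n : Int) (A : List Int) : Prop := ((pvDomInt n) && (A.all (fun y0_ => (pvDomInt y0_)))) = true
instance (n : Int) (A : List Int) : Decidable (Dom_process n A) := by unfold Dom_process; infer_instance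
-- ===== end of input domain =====

-- B replaces A's bottom-up depth-array DP + incremental parity dict by an independent parent-chain
-- walk per node plus a count-based odd-level tally over the distinct depths (objective: alternative).

-- ===== PORT A =====
-- body of A's depth loop: depth[i] = depth[A[i-2]] + 1
def processStepA (A : List Int) (dep : List Int) (i : Int) : List Int :=
  let pi := PySem.List.pyGetD A (i - 2) 0
  PySem.List.pySetD dep i (PySem.List.pyGetD dep pi 0 + 1)

-- body of A's parity-dict loop: if x not in d: d[x] = 0; d[x] = (d[x] + 1) % 2
def processStepD (d : PySem.Dict Int Int) (x : Int) : PySem.Dict Int Int :=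
  let d := if d.contains x then d else d.insert x 0
  d.insert x (PySem.Int.mod (d.getD x 0 + 1) 2)

def process (n : Int) (A : List Int) : Int :=
  let depth0 := (PySem.List.pyRange 0 (n + 1) 1).map (fun _ => (0 : Int))
  let depth1 := PySem.List.pySetD depth0 1 0       -- depth[1] = 0 (in range under Pre_)
  let depth := (PySem.List.pyRange 2 (n + 1) 1).foldl (processStepA A) depth1
  let d := (PySem.List.pyRange 1 (n + 1) 1).foldl
      (fun d i => processStepD d (PySem.List.pyGetD depth i 0)) PySem.Dict.empty
  d.values.sum

-- ===== PORT B =====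
-- B's inner 'while v != 1: v = A[v-2]; d += 1', as fuel recursion (fuel A.length suffices under Pre_,
-- where each parent index is strictly smaller than its child); A[v-2] via pyGetD, exact under Pre_.
def chainDepth (A : List Int) : Nat → Int → Int
  | 0, _ => 0
  | f + 1, v =>
      if v = 1 then 0 else chainDepth A f (PySem.List.pyGetD A (v - 2) 0) + 1

def process_alt (n : Int) (A : List Int) : Int :=
  let ds := (PySem.List.pyRange 1 (n + 1) 1).map (fun v => chainDepth A A.length v)
  match PySem.List.max? ds (fun x => x) with
  | none => 0      -- Python's max([]) raises ValueError here (only when n ≤ 0): outside Pre_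
  | some height =>
      (PySem.List.pyRange 0 (height + 1) 1).foldl
        (fun acc lvl => if PySem.Int.mod ((ds.count lvl : Int)) 2 == 1 then acc + 1 else acc) 0

-- ===== PRECONDITION & SPEC =====
-- Pre_ admits exactly the well-formed tree encodings (every parent index in 1..child-1, the problem's
-- input format). Outside it A raises IndexError (n ≤ 0, too-short A, a parent entry below -(n+1) or
-- above n), or — when a parent index is negative or not smaller than its child, so the array encodes
-- no rooted tree — A returns an accidental value of its left-to-right pass (negative-index wraparound,
-- or a stale zero slot read before it is assigned) while B's parent-chain walk does not return there
-- (it cycles or runs off the array); those inputs are excluded.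
def Pre_process (n : Int) (A : List Int) : Prop :=
  1 ≤ n ∧ n - 1 ≤ (A.length : Int) ∧
  ∀ j : Nat, j < (n - 1).toNat → 1 ≤ A.getD j 0 ∧ A.getD j 0 ≤ (j : Int) + 1

instance (n : Int) (A : List Int) : Decidable (Pre_process n A) := by
  unfold Pre_process; infer_instance

def pvWitness_process : Int × List Int := (4, [1, 1, 2])

def Spec_process (n : Int) (A : List Int) (out : Int) : Prop := out = process_alt n A
instance (n : Int) (A : List Int) (out : Int) : Decidable (Spec_process n A out) := by
  unfold Spec_process; infer_instance

-- ===== CLAIM (what is proved, stated in full; the proofs are below) =====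
def Claim_equal_process : Prop :=
  ∀ (n : Int) (A : List Int), Dom_process n A → Pre_process n A → Spec_process n A (process n A)

-- ===== LEMMAS AND PROOFS =====

-- A's depth array after the depth loop truncated at node m
def depA (n : Int) (A : List Int) (m : Int) : List Int :=
  (PySem.List.pyRange 2 (m + 1) 1).foldl (processStepA A)
    (PySem.List.pySetD ((PySem.List.pyRange 0 (n + 1) 1).map (fun _ => (0 : Int))) 1 0)

lemma foldl_stepA_length (A : List Int) (l : List Int) (dep : List Int) :
    (l.foldl (processStepA A) dep).length = dep.length := by
  induction l generalizing dep with
  | nil => rfl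
  | cons i t ih => rw [List.foldl_cons, ih]; simp [processStepA, PySem.List.length_pySetD]

lemma depA_length (n : Int) (A : List Int) (m : Int) :
    (depA n A m).length = (n + 1).toNat := by
  unfold depA
  rw [foldl_stepA_length]
  simp [PySem.List.length_pySetD, PySem.List.length_pyRange_one]

lemma pyGetD_zero_of_all_zero (l : List Int) (hall : ∀ x ∈ l, x = 0) (v : Int) :
    PySem.List.pyGetD l v 0 = 0 := by
  cases hg : PySem.List.pyGet? l v with
  | none => exact PySem.List.pyGetD_of_none l v 0 hg
  | some x =>
    have hir : PySem.Raise.InRange l.length v := by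
      by_contra hc
      rw [(PySem.List.pyGet?_eq_none_iff l v).mpr hc] at hg
      exact absurd hg.symm (Option.some_ne_none x)
    exact hall _ (PySem.List.pyGetD_mem l 0 hir)

lemma depA_one_zero (n : Int) (A : List Int) (v : Int) :
    PySem.List.pyGetD (depA n A 1) v 0 = 0 := by
  have hnil : PySem.List.pyRange 2 (1 + 1) 1 = [] := PySem.List.pyRange_one_eq_nil (by omega)
  unfold depA
  rw [hnil]
  simp only [List.foldl_nil]
  apply pyGetD_zero_of_all_zero
  intro x hx
  rw [PySem.List.pySetD_of_nonneg _ _ (by omega)] at hx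
  rcases List.mem_or_eq_of_mem_set hx with h | h
  · rcases List.mem_map.mp h with ⟨a, _, h0⟩
    exact h0.symm
  · exact h

lemma depA_succ (n : Int) (A : List Int) (m : Int) (h : 1 ≤ m) :
    depA n A (m + 1) = processStepA A (depA n A m) (m + 1) := by
  have hr : PySem.List.pyRange 2 (m + 1 + 1) 1 = PySem.List.pyRange 2 (m + 1) 1 ++ [m + 1] :=
    PySem.List.pyRange_one_succ_right (by omega)
  unfold depA
  rw [hr, List.foldl_append]
  rfl

-- the value at node v is fixed once the loop has passed v
lemma depA_stable (n : Int) (A : List Int) (v m : Int) (h1 : 1 ≤ v) (hvn : v ≤ n)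
    (hvm : v ≤ m) :
    PySem.List.pyGetD (depA n A m) v 0 = PySem.List.pyGetD (depA n A v) v 0 := by
  induction m, hvm using Int.le_induction with
  | base => rfl
  | succ m hm ih =>
    have hlen : ((depA n A m).length : Int) = n + 1 := by
      rw [depA_length]; omega
    rw [depA_succ n A m (by omega)]
    unfold processStepA
    rw [PySem.List.pySetD_of_nonneg _ _ (by omega : (0:Int) ≤ m + 1)]
    rw [PySem.List.pyGetD_eq_getElem _ 0 (by omega) (by rw [List.length_set]; omega)]
    rw [List.getElem_set_ne (by omega)]
    rw [← PySem.List.pyGetD_eq_getElem (depA n A m) 0 (by omega) (by omega)]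
    exact ih

-- A's final depth value of each node
def depVal (n : Int) (A : List Int) (v : Int) : Int :=
  PySem.List.pyGetD (depA n A n) v 0

lemma depVal_one (n : Int) (A : List Int) (hn : 1 ≤ n) : depVal n A 1 = 0 := by
  unfold depVal
  rw [depA_stable n A 1 n (by omega) hn hn]
  exact depA_one_zero n A 1

-- the parent of node v under Pre_
lemma parent_bounds (n : Int) (A : List Int) (hpre : Pre_process n A) (v : Int)
    (h2 : 2 ≤ v) (hvn : v ≤ n) :
    1 ≤ PySem.List.pyGetD A (v - 2) 0 ∧ PySem.List.pyGetD A (v - 2) 0 ≤ v - 1 := by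
  obtain ⟨hn, hlenA, hpar⟩ := hpre
  have hj := hpar (v - 2).toNat (by omega)
  rw [List.getD_eq_getElem?_getD, List.getElem?_eq_getElem (by omega), Option.getD_some] at hj
  rw [PySem.List.pyGetD_eq_getElem A 0 (by omega) (by omega)]
  omega

lemma depVal_rec (n : Int) (A : List Int) (hpre : Pre_process n A) (v : Int)
    (h2 : 2 ≤ v) (hvn : v ≤ n) :
    depVal n A v = depVal n A (PySem.List.pyGetD A (v - 2) 0) + 1 := by
  obtain ⟨hpi1, hpi2⟩ := parent_bounds n A hpre v h2 hvn
  set pi := PySem.List.pyGetD A (v - 2) 0 with hpidef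
  set w : Int := PySem.List.pyGetD (depA n A (v - 1)) pi 0 + 1 with hw
  have hlen : ((depA n A (v - 1)).length : Int) = n + 1 := by
    rw [depA_length]; omega
  have hstep : depA n A v = PySem.List.pySetD (depA n A (v - 1)) v w := by
    have h := depA_succ n A (v - 1) (by omega)
    rw [show v - 1 + 1 = v by omega] at h
    rw [h]; rfl
  have hsetform : PySem.List.pySetD (depA n A (v - 1)) v w = (depA n A (v - 1)).set v.toNat w :=
    PySem.List.pySetD_of_nonneg _ _ (by omega)
  have e1 : PySem.List.pyGetD ((depA n A (v - 1)).set v.toNat w) v 0 = w := by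
    rw [PySem.List.pyGetD_eq_getElem _ 0 (by omega) (by rw [List.length_set]; omega)]
    exact List.getElem_set_self _
  unfold depVal
  rw [depA_stable n A v n (by omega) hvn hvn, hstep, hsetform, e1, hw]
  congr 1
  rw [depA_stable n A pi (v - 1) (by omega) (by omega) (by omega),
    ← depA_stable n A pi n (by omega) (by omega) (by omega)]

-- B's parent-chain walk computes A's final depth value
lemma chainDepth_eq_depVal (n : Int) (A : List Int) (hpre : Pre_process n A)
    (f : Nat) (v : Int) (h1 : 1 ≤ v) (hvn : v ≤ n) (hf : v.toNat ≤ f + 1) :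
    chainDepth A f v = depVal n A v := by
  induction f generalizing v with
  | zero =>
    have hv1 : v = 1 := by omega
    subst hv1
    rw [depVal_one n A (by omega)]
    rfl
  | succ f ih =>
    by_cases hv1 : v = 1
    · subst hv1
      rw [depVal_one n A (by omega)]
      simp [chainDepth]
    · obtain ⟨hpi1, hpi2⟩ := parent_bounds n A hpre v (by omega) hvn
      have hrec := depVal_rec n A hpre v (by omega) hvn
      simp only [chainDepth, hv1, if_false]
      rw [ih (PySem.List.pyGetD A (v - 2) 0) hpi1 (by omega) (by omega), hrec]

lemma chainDepth_nonneg (A : List Int) (f : Nat) (v : Int) : 0 ≤ chainDepth A f v := by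
  induction f generalizing v with
  | zero => simp [chainDepth]
  | succ f ih =>
    by_cases h : v = 1
    · simp [chainDepth, h]
    · simp only [chainDepth, h, if_false]
      have := ih (PySem.List.pyGetD A (v - 2) 0)
      omega

-- A's parity step, resolved by whether the key is already present
lemma processStepD_contains (d : PySem.Dict Int Int) (x : Int) (hc : d.contains x = true) :
    processStepD d x = d.insert x (PySem.Int.mod (d.getD x 0 + 1) 2) := by
  simp [processStepD, hc]

lemma processStepD_not_contains (d : PySem.Dict Int Int) (x : Int)
    (hc : d.contains x = false) : processStepD d x = d.insert x 1 := by
  simp only [processStepD, hc, Bool.false_eq_true, if_false,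
    PySem.Dict.getD_insert_self, PySem.Dict.insert_insert_self]
  norm_num

-- A's parity-dict fold over a list, characterised by counts over the distinct elements
lemma items_foldl_stepD (xs : List Int) :
    (xs.foldl processStepD PySem.Dict.empty).items
      = (PySem.Set.ofList xs).map
          (fun x => (x, PySem.Int.mod ((xs.count x : Int)) 2)) := by
  induction xs using List.reverseRecOn with
  | nil => rfl
  | append_singleton xs y ih =>
    have hkeys : (xs.foldl processStepD PySem.Dict.empty).keys = PySem.Set.ofList xs := by
      simp only [PySem.Dict.keys, ih, List.map_map]
      exact List.map_id' _
    have hnd : (xs.foldl processStepD PySem.Dict.empty).keys.Nodup := by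
      rw [hkeys]; exact PySem.Set.nodup_ofList xs
    have hcontains : (xs.foldl processStepD PySem.Dict.empty).contains y
        = decide (y ∈ xs) := by
      rw [PySem.Dict.contains_eq_decide_mem_keys, hkeys]
      simp [PySem.Set.mem_ofList]
    have hcnt : ∀ x : Int, (xs ++ [y]).count x
        = xs.count x + (if x = y then 1 else 0) := by
      intro x
      by_cases h : x = y
      · subst h; simp [List.count_append]
      · have h' : ¬ y = x := fun hh => h hh.symm
        simp [List.count_append, h, h']
    rw [List.foldl_append, List.foldl_cons, List.foldl_nil]
    by_cases hy : y ∈ xs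
    · -- y already seen: overwrite its parity in place
      have hc : (xs.foldl processStepD PySem.Dict.empty).contains y = true := by
        rw [hcontains]; simp [hy]
      have hmem : (y, PySem.Int.mod ((xs.count y : Int)) 2)
          ∈ (xs.foldl processStepD PySem.Dict.empty).items := by
        rw [ih]
        exact List.mem_map.mpr ⟨y, (PySem.Set.mem_ofList _ _).mpr hy, rfl⟩
      have hgetD : (xs.foldl processStepD PySem.Dict.empty).getD y 0
          = PySem.Int.mod ((xs.count y : Int)) 2 :=
        PySem.Dict.getD_of_mem_items _ hmem hnd 0
      have hmod : PySem.Int.mod (PySem.Int.mod ((xs.count y : Int)) 2 + 1) 2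
          = PySem.Int.mod (((xs ++ [y]).count y : Int)) 2 := by
        rw [PySem.Int.mod_eq_emod_of_pos (by omega : (0:Int) < 2),
          PySem.Int.mod_eq_emod_of_pos (by omega : (0:Int) < 2),
          PySem.Int.mod_eq_emod_of_pos (by omega : (0:Int) < 2), hcnt y]
        push_cast
        omega
      rw [processStepD_contains _ _ hc, hgetD, hmod,
        PySem.Dict.items_insert_of_contains _ _ hc, ih, List.map_map]
      have hset : PySem.Set.ofList (xs ++ [y]) = PySem.Set.ofList xs := by
        rw [PySem.Set.ofList_append_singleton,
          PySem.Set.add_of_mem ((PySem.Set.mem_ofList _ _).mpr hy)]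
      rw [hset]
      apply List.map_congr_left
      intro x hx
      by_cases hxy : x = y
      · subst hxy
        simp
      · have hbe : (x == y) = false := by simp [hxy]
        simp only [Function.comp, hbe, Bool.false_eq_true, if_false]
        rw [hcnt x]
        simp [hxy]
    · -- y new: appended with parity 1
      have hc : (xs.foldl processStepD PySem.Dict.empty).contains y = false := by
        rw [hcontains]; simp [hy]
      have hcy : xs.count y = 0 := List.count_eq_zero.mpr hy
      rw [processStepD_not_contains _ _ hc,
        PySem.Dict.items_insert_of_not_contains _ _ (by simpa using hc), ih]
      have hset : PySem.Set.ofList (xs ++ [y]) = PySem.Set.ofList xs ++ [y] := by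
        rw [PySem.Set.ofList_append_singleton,
          PySem.Set.add_of_not_mem (fun h => hy ((PySem.Set.mem_ofList _ _).mp h))]
      rw [hset, List.map_append]
      congr 1
      · apply List.map_congr_left
        intro x hx
        have hxy : x ≠ y := fun h => hy (h ▸ (PySem.Set.mem_ofList _ _).mp hx)
        rw [hcnt x]
        simp [hxy]
      · simp only [List.map_cons, List.map_nil]
        rw [hcnt y]
        simp [hcy]

-- ===== VERDICT (by name: the statement is the Claim_ definition above) =====
theorem process_spec : Claim_equal_process := by
  unfold Claim_equal_process
  intro n A _hdom hpre
  unfold Spec_process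
  have hn : 1 ≤ n := hpre.1
  have hlenA : n - 1 ≤ (A.length : Int) := hpre.2.1
  -- both sides are about the same list of node depths
  have hds : (PySem.List.pyRange 1 (n + 1) 1).map (fun v => chainDepth A A.length v)
      = (PySem.List.pyRange 1 (n + 1) 1).map (fun v => depVal n A v) := by
    apply List.map_congr_left
    intro v hv
    have hb := PySem.List.mem_pyRange_one.mp hv
    exact chainDepth_eq_depVal n A hpre A.length v (by omega) (by omega) (by omega)
  have hA : process n A =
      (((PySem.List.pyRange 1 (n + 1) 1).map (fun v => depVal n A v)).foldl
        processStepD PySem.Dict.empty).values.sum := by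
    unfold process depVal depA
    rw [List.foldl_map]
  set xs := (PySem.List.pyRange 1 (n + 1) 1).map (fun v => depVal n A v) with hxsdef
  set p : Int → Bool := fun lvl => PySem.Int.mod ((xs.count lvl : Int)) 2 == 1 with hpdef
  have hlen0 : xs.length = n.toNat := by
    rw [hxsdef]
    simp [PySem.List.length_pyRange_one]
  have hne : xs ≠ [] := by
    intro hcon
    rw [hcon] at hlen0
    simp at hlen0
    omega
  have hmem_xs : ∀ x ∈ xs, 0 ≤ x := by
    intro x hx
    rw [hxsdef] at hx
    obtain ⟨v, hv, rfl⟩ := List.mem_map.mp hx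
    have hb := PySem.List.mem_pyRange_one.mp hv
    rw [← chainDepth_eq_depVal n A hpre A.length v (by omega) (by omega) (by omega)]
    exact chainDepth_nonneg A A.length v
  -- A's answer is the number of distinct depths with odd multiplicity
  have hterm : ∀ x ∈ PySem.Set.ofList xs,
      PySem.Int.mod ((xs.count x : Int)) 2 = if p x = true then (1 : Int) else 0 := by
    intro x _
    by_cases hx : PySem.Int.mod ((xs.count x : Int)) 2 = 1
    · have hpx : p x = true := by rw [hpdef]; simpa using hx
      rw [hpx, if_pos rfl, hx]
    · have h0 : PySem.Int.mod ((xs.count x : Int)) 2 = 0 := by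
        rw [PySem.Int.mod_eq_emod_of_pos (by omega : (0:Int) < 2)] at hx ⊢
        omega
      have hpx : p x = false := by
        rw [hpdef]; simpa using hx
      rw [hpx, h0]
      simp
  have hAc : process n A = ((PySem.Set.ofList xs).countP p : Int) := by
    rw [hA]
    simp only [PySem.Dict.values, items_foldl_stepD, List.map_map]
    have hmap : ((PySem.Set.ofList xs).map
          ((fun p => p.2) ∘ fun x => (x, PySem.Int.mod ((xs.count x : Int)) 2))).sum
        = ((PySem.Set.ofList xs).map (fun x => if p x = true then (1 : Int) else 0)).sum := by
      apply congrArg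
      exact List.map_congr_left hterm
    rw [hmap, PySem.List.sum_map_ite_one_zero]
  -- an odd level is an occurring depth
  have hp_mem : ∀ lvl : Int, p lvl = true → lvl ∈ xs := by
    intro lvl hplvl
    rw [hpdef] at hplvl
    simp only [beq_iff_eq] at hplvl
    by_contra hnx
    rw [List.count_eq_zero.mpr hnx] at hplvl
    rw [PySem.Int.mod_eq_emod_of_pos (by omega : (0:Int) < 2)] at hplvl
    simp at hplvl
  -- B's answer, through the max level
  cases hmax : PySem.List.max? xs (fun x => x) with
  | none => exact absurd ((PySem.List.max?_eq_none_iff _ _).mp hmax) hne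
  | some h =>
    have hhle : ∀ y ∈ xs, y ≤ h := PySem.List.max?_isMax hmax
    have hBval : process_alt n A = 0 + ((PySem.List.pyRange 0 (h + 1) 1).countP p : Int) := by
      unfold process_alt
      rw [hds]
      show (match PySem.List.max? xs (fun x => x) with
          | none => (0 : Int)
          | some height =>
              (PySem.List.pyRange 0 (height + 1) 1).foldl
                (fun acc lvl =>
                  if (PySem.Int.mod ((xs.count lvl : Int)) 2 == 1) = true then acc + 1 else acc) 0)
        = 0 + ((PySem.List.pyRange 0 (h + 1) 1).countP p : Int)
      rw [hmax]
      exact PySem.List.foldl_if_add_one p _ 0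
    have hperm : ((PySem.List.pyRange 0 (h + 1) 1).filter p).Perm
        ((PySem.Set.ofList xs).filter p) := by
      apply (List.perm_ext_iff_of_nodup
        ((PySem.List.nodup_pyRange_one 0 (h + 1)).filter p)
        ((PySem.Set.nodup_ofList xs).filter p)).mpr
      intro lvl
      simp only [List.mem_filter, PySem.List.mem_pyRange_one]
      constructor
      · rintro ⟨-, hp⟩
        exact ⟨(PySem.Set.mem_ofList _ _).mpr (hp_mem lvl hp), hp⟩
      · rintro ⟨hmem, hp⟩
        have hx : lvl ∈ xs := (PySem.Set.mem_ofList _ _).mp hmem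
        have h1 := hmem_xs lvl hx
        have h2 := hhle lvl hx
        exact ⟨⟨h1, by omega⟩, hp⟩
    have hcount : (PySem.List.pyRange 0 (h + 1) 1).countP p
        = (PySem.Set.ofList xs).countP p := by
      rw [List.countP_eq_length_filter, List.countP_eq_length_filter]
      exact hperm.length_eq
    rw [hAc, hBval, hcount, zero_add]
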